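-- pv_equiv track=rewrite | github.com/sethmh82/SethDevelopment | Python/BruteForce-Stacks.py | stack_solution
-- ===== SOURCE A (Python) =====
-- def stack_solution(arr): #O(N)
--     # this solution uses Stacks. Every index starts with n possibilities.
--     # Using stack, going from left to right, we remove the subarrays that
--     # doesn't satisify the problem condition at this line:
--     # 'result[st.pop()] -= n-i'
--     # Then we do it again from right to left.
--     n = len(arr)
--     result = [n] * n
--     st = []
--     for i, x in enumerate(arr):
--         while st and x >= arr[st[-1]]:
--             result[st.pop()] -= n-i
--         st.append(i)
--     st.clear()
--     for i, x in reversed(list(enumerate(arr))):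
--         while st and x >= arr[st[-1]]:
--             result[st.pop()] -= i+1
--         st.append(i)
--     return result
-- ===== SOURCE B (Python) =====
-- def stack_solution(arr):
--     # Per-index two-sided scan: walk left and right from each index to the
--     # nearest element >= arr[i]; the answer is the distance between the stops.
--     n = len(arr)
--     out = []
--     for i in range(n):
--         left = i - 1
--         while left >= 0 and arr[left] < arr[i]:
--             left -= 1
--         right = i + 1
--         while right < n and arr[right] < arr[i]:
--             right += 1
--         out.append(right - left - 1)
--     return out
-- ===== Notes on version B (the rewrite author's own statement) =====
-- stated objective: simpler
-- what changed: B drops A's two global monotonic-stack passes over a shared mutable result array and instead, for each index independently, walks left and right to the nearest element >= arr[i] and returns the distance between the two stops.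
import Mathlib
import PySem

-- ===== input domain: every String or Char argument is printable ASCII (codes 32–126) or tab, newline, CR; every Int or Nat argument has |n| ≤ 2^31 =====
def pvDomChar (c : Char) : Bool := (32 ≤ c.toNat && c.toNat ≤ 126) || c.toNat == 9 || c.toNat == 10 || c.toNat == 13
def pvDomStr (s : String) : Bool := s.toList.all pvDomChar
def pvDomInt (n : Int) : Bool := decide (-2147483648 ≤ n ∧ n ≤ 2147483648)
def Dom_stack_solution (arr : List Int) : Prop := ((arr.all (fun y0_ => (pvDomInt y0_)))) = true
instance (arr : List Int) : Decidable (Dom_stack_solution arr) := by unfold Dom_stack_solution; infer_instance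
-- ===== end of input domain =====

-- B replaces A's two monotonic-stack passes by a per-index two-sided scan to the
-- nearest element >= arr[i] on each side (simpler code; quadratic, not linear).

-- ===== PORT A =====
-- A's first while loop: pop while x >= arr[st[-1]], doing result[st.pop()] -= n-i
def aPop1 (arr : List Int) (n : Nat) (x : Int) (i : Nat) : List Int → List Nat → List Int × List Nat
  | res, [] => (res, [])
  | res, t :: rest =>
    if arr.getD t 0 ≤ x then
      aPop1 arr n x i (res.set t (res.getD t 0 - ((n : Int) - (i : Int)))) rest
    else (res, t :: rest)

-- A's second while loop: pop while x >= arr[st[-1]], doing result[st.pop()] -= i+1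
def aPop2 (arr : List Int) (x : Int) (i : Nat) : List Int → List Nat → List Int × List Nat
  | res, [] => (res, [])
  | res, t :: rest =>
    if arr.getD t 0 ≤ x then
      aPop2 arr x i (res.set t (res.getD t 0 - ((i : Int) + 1))) rest
    else (res, t :: rest)

-- one iteration of A's first for loop (while loop, then st.append(i))
def aStep1 (arr : List Int) (n : Nat) (s : List Int × List Nat) (i : Nat) : List Int × List Nat :=
  let p := aPop1 arr n (arr.getD i 0) i s.1 s.2
  (p.1, i :: p.2)

-- one iteration of A's second for loop
def aStep2 (arr : List Int) (s : List Int × List Nat) (i : Nat) : List Int × List Nat :=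
  let p := aPop2 arr (arr.getD i 0) i s.1 s.2
  (p.1, i :: p.2)

def stack_solution (arr : List Int) : List Int :=
  let n := arr.length
  let s1 := (List.range n).foldl (aStep1 arr n) (List.replicate n (n : Int), ([] : List Nat))
  let s2 := ((List.range n).reverse).foldl (aStep2 arr) (s1.1, ([] : List Nat))
  s2.1

-- ===== PORT B =====
-- B's left scan 'while left >= 0 and arr[left] < x: left -= 1', with k = left+1;
-- returns the final left (possibly -1)
def bLeft (arr : List Int) (x : Int) : Nat → Int
  | 0 => -1
  | k + 1 => if arr.getD k 0 < x then bLeft arr x k else (k : Int)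

-- B's right scan 'while right < n and arr[right] < x: right += 1', fuel = n - j;
-- returns the final right
def bRight (arr : List Int) (x : Int) : Nat → Nat → Int
  | j, 0 => (j : Int)
  | j, m + 1 => if arr.getD j 0 < x then bRight arr x (j + 1) m else (j : Int)

def stack_solution_alt (arr : List Int) : List Int :=
  let n := arr.length
  (List.range n).map (fun i =>
    bRight arr (arr.getD i 0) (i + 1) (n - (i + 1)) - bLeft arr (arr.getD i 0) i - 1)

-- ===== PRECONDITION & SPEC =====
def Spec_stack_solution (arr : List Int) (out : List Int) : Prop := out = stack_solution_alt arr
instance (arr : List Int) (out : List Int) : Decidable (Spec_stack_solution arr out) := by unfold Spec_stack_solution; infer_instance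

-- ===== CLAIM (what is proved, stated in full; the proofs are below) =====
def Claim_equal_stack_solution : Prop := ∀ (arr : List Int), Dom_stack_solution arr → Spec_stack_solution arr (stack_solution arr)

-- ===== LEMMAS AND PROOFS =====

-- the value B computes for the right boundary of index t ("next >= element index, else n")
def nge (arr : List Int) (t : Nat) : Int :=
  bRight arr (arr.getD t 0) (t + 1) (arr.length - (t + 1))

lemma getD_set_self (l : List Int) (t : Nat) (v : Int) (h : t < l.length) :
    (l.set t v).getD t 0 = v := by
  simp [List.getD_eq_getElem?_getD, h]

lemma getD_set_ne (l : List Int) (t j : Nat) (v : Int) (h : j ≠ t) :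
    (l.set t v).getD j 0 = l.getD j 0 := by
  simp [List.getD_eq_getElem?_getD, (Ne.symm h : t ≠ j)]

lemma bRight_none (arr : List Int) (x : Int) :
    ∀ (m j : Nat), (∀ k, j ≤ k → k < j + m → arr.getD k 0 < x) →
    bRight arr x j m = ((j + m : Nat) : Int) := by
  intro m
  induction m with
  | zero => intro j _; simp [bRight]
  | succ m ih =>
    intro j h
    rw [bRight, if_pos (h j (le_refl _) (by omega))]
    rw [ih (j + 1) (fun k hk1 hk2 => h k (by omega) (by omega))]
    congr 1
    omega

lemma bRight_found (arr : List Int) (x : Int) :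
    ∀ (m j r : Nat), j ≤ r → r < j + m → ¬ arr.getD r 0 < x →
    (∀ k, j ≤ k → k < r → arr.getD k 0 < x) →
    bRight arr x j m = (r : Int) := by
  intro m
  induction m with
  | zero => intro j r h1 h2 _ _; omega
  | succ m ih =>
    intro j r h1 h2 h3 h4
    by_cases hjr : j = r
    · subst hjr; rw [bRight, if_neg h3]
    · rw [bRight, if_pos (h4 j (le_refl _) (by omega))]
      exact ih (j + 1) r (by omega) (by omega) h3 (fun k hk1 hk2 => h4 k (by omega) hk2)

lemma bLeft_none (arr : List Int) (x : Int) :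
    ∀ (k : Nat), (∀ j, j < k → arr.getD j 0 < x) → bLeft arr x k = -1 := by
  intro k
  induction k with
  | zero => intro _; rfl
  | succ k ih =>
    intro h
    rw [bLeft, if_pos (h k (by omega))]
    exact ih (fun j hj => h j (by omega))

lemma bLeft_found (arr : List Int) (x : Int) :
    ∀ (k r : Nat), r < k → ¬ arr.getD r 0 < x →
    (∀ j, r < j → j < k → arr.getD j 0 < x) →
    bLeft arr x k = (r : Int) := by
  intro k
  induction k with
  | zero => intro r h1 _ _; omega
  | succ k ih =>
    intro r h1 h2 h3
    by_cases hrk : r = k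
    · subst hrk; rw [bLeft, if_neg h2]
    · rw [bLeft, if_pos (h3 k (by omega) (by omega))]
      exact ih r (by omega) h2 (fun j hj1 hj2 => h3 j hj1 (by omega))

-- both of A's while loops are instances of one generic pop loop with a subtrahend δ
def gpop (arr : List Int) (x δ : Int) : List Int → List Nat → List Int × List Nat
  | res, [] => (res, [])
  | res, t :: rest =>
    if arr.getD t 0 ≤ x then gpop arr x δ (res.set t (res.getD t 0 - δ)) rest
    else (res, t :: rest)

lemma aPop1_eq_gpop (arr : List Int) (n : Nat) (x : Int) (i : Nat) :
    ∀ (st : List Nat) (res : List Int),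
    aPop1 arr n x i res st = gpop arr x ((n : Int) - (i : Int)) res st := by
  intro st
  induction st with
  | nil => intro res; rfl
  | cons t rest ih =>
    intro res
    rw [aPop1, gpop]
    by_cases hc : arr.getD t 0 ≤ x
    · rw [if_pos hc, if_pos hc, ih]
    · rw [if_neg hc, if_neg hc]

lemma aPop2_eq_gpop (arr : List Int) (x : Int) (i : Nat) :
    ∀ (st : List Nat) (res : List Int),
    aPop2 arr x i res st = gpop arr x ((i : Int) + 1) res st := by
  intro st
  induction st with
  | nil => intro res; rfl
  | cons t rest ih =>
    intro res
    rw [aPop2, gpop]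
    by_cases hc : arr.getD t 0 ≤ x
    · rw [if_pos hc, if_pos hc, ih]
    · rw [if_neg hc, if_neg hc]

lemma gpop_spec (arr : List Int) (x δ : Int) :
    ∀ (st : List Nat) (res : List Int),
    (∀ t ∈ st, t < res.length) →
    st.Pairwise (· ≠ ·) →
    st.Pairwise (fun a b => arr.getD a 0 < arr.getD b 0) →
    (gpop arr x δ res st).2 <:+ st ∧
    (gpop arr x δ res st).1.length = res.length ∧
    (∀ t ∈ (gpop arr x δ res st).2, x < arr.getD t 0) ∧
    (∀ t ∈ st, t ∉ (gpop arr x δ res st).2 →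
      arr.getD t 0 ≤ x ∧ (gpop arr x δ res st).1.getD t 0 = res.getD t 0 - δ) ∧
    (∀ j : Nat, (j ∉ st ∨ j ∈ (gpop arr x δ res st).2) →
      (gpop arr x δ res st).1.getD j 0 = res.getD j 0) := by
  intro st
  induction st with
  | nil =>
    intro res _ _ _
    refine ⟨List.suffix_rfl, rfl, ?_, ?_, fun j _ => rfl⟩ <;> simp [gpop]
  | cons t rest ih =>
    intro res hlen hne hval
    by_cases hc : arr.getD t 0 ≤ x
    · have heq : gpop arr x δ res (t :: rest)
          = gpop arr x δ (res.set t (res.getD t 0 - δ)) rest := by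
        rw [gpop, if_pos hc]
      have htnotrest : t ∉ rest := fun hm => (List.pairwise_cons.mp hne).1 t hm rfl
      have hlen' : ∀ u ∈ rest, u < (res.set t (res.getD t 0 - δ)).length := by
        intro u hu; simpa using hlen u (List.mem_cons_of_mem _ hu)
      obtain ⟨s1, s2, s3, s4, s5⟩ := ih (res.set t (res.getD t 0 - δ)) hlen'
        (List.Pairwise.of_cons hne) (List.Pairwise.of_cons hval)
      rw [heq]
      refine ⟨s1.trans (List.suffix_cons t rest), by rw [s2]; simp, s3, ?_, ?_⟩
      · intro u hu hnot
        rcases List.mem_cons.mp hu with h | h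
        · subst h
          refine ⟨hc, ?_⟩
          rw [s5 u (Or.inl htnotrest), getD_set_self _ _ _ (hlen u List.mem_cons_self)]
        · obtain ⟨c1, c2⟩ := s4 u h hnot
          have hut : u ≠ t := fun he => htnotrest (he ▸ h)
          exact ⟨c1, by rw [c2, getD_set_ne _ _ _ _ hut]⟩
      · intro j hj
        have hjt : j ≠ t := by
          rcases hj with hj | hj
          · exact fun he => hj (he ▸ List.mem_cons_self)
          · exact fun he => htnotrest (he ▸ s1.sublist.mem hj)
        have hj' : j ∉ rest ∨ j ∈ (gpop arr x δ (res.set t (res.getD t 0 - δ)) rest).2 := by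
          rcases hj with hj | hj
          · exact Or.inl (fun hm => hj (List.mem_cons_of_mem _ hm))
          · exact Or.inr hj
        rw [s5 j hj', getD_set_ne _ _ _ _ hjt]
    · rw [gpop, if_neg hc]
      refine ⟨List.suffix_rfl, rfl, ?_, ?_, fun j _ => rfl⟩
      · intro u hu
        rcases List.mem_cons.mp hu with h | h
        · subst h; exact lt_of_not_ge hc
        · exact lt_trans (lt_of_not_ge hc) ((List.pairwise_cons.mp hval).1 u h)
      · intro u hu hnot
        exact (hnot hu).elim

-- invariant of A's first pass: after processing indices [0, k), popped indices hold
-- their final nge value, stack members still hold n and have seen no >= element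
lemma pass1 (arr : List Int) :
    ∀ (m k : Nat) (res : List Int) (st : List Nat),
    k + m ≤ arr.length →
    res.length = arr.length →
    (∀ t ∈ st, t < k) →
    st.Pairwise (· > ·) →
    st.Pairwise (fun a b => arr.getD a 0 < arr.getD b 0) →
    (∀ t ∈ st, ∀ j, t < j → j < k → arr.getD j 0 < arr.getD t 0) →
    (∀ t ∈ st, res.getD t 0 = (arr.length : Int)) →
    (∀ t, k ≤ t → t < arr.length → res.getD t 0 = (arr.length : Int)) →
    (∀ t, t < k → t ∉ st → res.getD t 0 = nge arr t) →
    ((List.range' k m).foldl (aStep1 arr arr.length) (res, st)).1.length = arr.length ∧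
    (∀ t ∈ ((List.range' k m).foldl (aStep1 arr arr.length) (res, st)).2, t < k + m) ∧
    (∀ t ∈ ((List.range' k m).foldl (aStep1 arr arr.length) (res, st)).2,
      ∀ j, t < j → j < k + m → arr.getD j 0 < arr.getD t 0) ∧
    (∀ t ∈ ((List.range' k m).foldl (aStep1 arr arr.length) (res, st)).2,
      ((List.range' k m).foldl (aStep1 arr arr.length) (res, st)).1.getD t 0 = (arr.length : Int)) ∧
    (∀ t, t < k + m → t ∉ ((List.range' k m).foldl (aStep1 arr arr.length) (res, st)).2 →
      ((List.range' k m).foldl (aStep1 arr arr.length) (res, st)).1.getD t 0 = nge arr t) := by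
  intro m
  induction m with
  | zero =>
    intro k res st _ h2 h3 _ _ h6 h7 _ h9
    exact ⟨h2, fun t ht => by simpa using h3 t ht, fun t ht => by simpa using h6 t ht,
      h7, fun t ht => h9 t (by omega)⟩
  | succ m ih =>
    intro k res st h1 h2 h3 h4 h5 h6 h7 h8 h9
    have hkn : k < arr.length := by omega
    have hrange : List.range' k (m + 1) = k :: List.range' (k + 1) m := rfl
    rw [hrange]
    simp only [List.foldl_cons]
    have hstep : aStep1 arr arr.length (res, st) k
        = ((gpop arr (arr.getD k 0) ((arr.length : Int) - (k : Int)) res st).1,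
            k :: (gpop arr (arr.getD k 0) ((arr.length : Int) - (k : Int)) res st).2) := by
      simp only [aStep1]
      rw [aPop1_eq_gpop]
    rw [hstep, show k + (m + 1) = k + 1 + m from by omega]
    set x := arr.getD k 0 with hx
    set q := gpop arr x ((arr.length : Int) - (k : Int)) res st with hq
    obtain ⟨s1, s2, s3, s4, s5⟩ := gpop_spec arr x ((arr.length : Int) - (k : Int)) st res
      (fun t ht => by rw [h2]; exact lt_trans (h3 t ht) hkn)
      (h4.imp (fun hab => by omega)) h5
    have hsubmem : ∀ t ∈ q.2, t ∈ st := fun t ht => s1.sublist.mem ht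
    have hknotst : k ∉ st := fun hm => by have := h3 k hm; omega
    refine ih (k + 1) q.1 (k :: q.2) (by omega) (by rw [s2, h2]) ?_ ?_ ?_ ?_ ?_ ?_ ?_
    · intro t ht
      rcases List.mem_cons.mp ht with h | h
      · omega
      · have := h3 t (hsubmem t h); omega
    · exact List.pairwise_cons.mpr ⟨fun t ht => h3 t (hsubmem t ht), h4.sublist s1.sublist⟩
    · exact List.pairwise_cons.mpr ⟨fun t ht => s3 t ht, h5.sublist s1.sublist⟩
    · intro t ht j hj1 hj2
      rcases List.mem_cons.mp ht with h | h
      · omega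
      · by_cases hjk : j = k
        · subst hjk; exact s3 t h
        · exact h6 t (hsubmem t h) j hj1 (by omega)
    · intro t ht
      rcases List.mem_cons.mp ht with h | h
      · subst h
        rw [s5 t (Or.inl hknotst)]
        exact h8 t (le_refl _) hkn
      · rw [s5 t (Or.inr h)]
        exact h7 t (hsubmem t h)
    · intro t ht1 ht2
      rw [s5 t (Or.inl (fun hm => by have := h3 t hm; omega))]
      exact h8 t (by omega) ht2
    · intro t ht1 ht2
      have htnot : t ∉ q.2 := fun hm => ht2 (List.mem_cons_of_mem _ hm)
      have htk : t ≠ k := fun he => ht2 (he ▸ List.mem_cons_self)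
      have htlt : t < k := by omega
      by_cases hmem : t ∈ st
      · obtain ⟨c1, c2⟩ := s4 t hmem htnot
        rw [c2, h7 t hmem]
        have hval : ((arr.length : Nat) : Int) - ((arr.length : Int) - (k : Int)) = (k : Int) := by
          ring
        rw [hval]
        symm
        unfold nge
        exact bRight_found arr (arr.getD t 0) (arr.length - (t + 1)) (t + 1) k
          (by omega) (by omega) (by rw [← hx]; exact fun hlt => absurd c1 (by omega))
          (fun j hj1 hj2 => h6 t hmem j (by omega) (by omega))
      · rw [s5 t (Or.inl hmem)]
        exact h9 t htlt hmem

-- invariant of A's second pass: processed indices not on the stack hold the final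
-- value nge - bLeft - 1; stack members still hold nge
lemma pass2 (arr : List Int) :
    ∀ (k : Nat) (res : List Int) (st : List Nat),
    k ≤ arr.length →
    res.length = arr.length →
    (∀ t ∈ st, k ≤ t ∧ t < arr.length) →
    st.Pairwise (· < ·) →
    st.Pairwise (fun a b => arr.getD a 0 < arr.getD b 0) →
    (∀ t ∈ st, ∀ j, k ≤ j → j < t → arr.getD j 0 < arr.getD t 0) →
    (∀ t ∈ st, res.getD t 0 = nge arr t) →
    (∀ t, t < k → res.getD t 0 = nge arr t) →
    (∀ t, k ≤ t → t < arr.length → t ∉ st →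
      res.getD t 0 = nge arr t - bLeft arr (arr.getD t 0) t - 1) →
    (((List.range k).reverse).foldl (aStep2 arr) (res, st)).1.length = arr.length ∧
    (∀ t, t < arr.length →
      (((List.range k).reverse).foldl (aStep2 arr) (res, st)).1.getD t 0
        = nge arr t - bLeft arr (arr.getD t 0) t - 1) := by
  intro k
  induction k with
  | zero =>
    intro res st _ h2 h3 _ _ h6 h7 _ h9
    refine ⟨h2, ?_⟩
    intro t ht
    simp only [List.range_zero, List.reverse_nil, List.foldl_nil]
    by_cases hmem : t ∈ st
    · rw [h7 t hmem]
      have : bLeft arr (arr.getD t 0) t = -1 :=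
        bLeft_none arr (arr.getD t 0) t (fun j hj => h6 t hmem j (by omega) hj)
      rw [this]
      ring
    · exact h9 t (by omega) ht hmem
  | succ k ih =>
    intro res st h1 h2 h3 h4 h5 h6 h7 h8 h9
    have hkn : k < arr.length := by omega
    have hrange : (List.range (k + 1)).reverse = k :: (List.range k).reverse := by
      simp [List.range_succ]
    rw [hrange]
    simp only [List.foldl_cons]
    have hstep : aStep2 arr (res, st) k
        = ((gpop arr (arr.getD k 0) ((k : Int) + 1) res st).1,
            k :: (gpop arr (arr.getD k 0) ((k : Int) + 1) res st).2) := by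
      simp only [aStep2]
      rw [aPop2_eq_gpop]
    rw [hstep]
    set x := arr.getD k 0 with hx
    set q := gpop arr x ((k : Int) + 1) res st with hq
    obtain ⟨s1, s2, s3, s4, s5⟩ := gpop_spec arr x ((k : Int) + 1) st res
      (fun t ht => by rw [h2]; exact (h3 t ht).2)
      (h4.imp (fun hab => by omega)) h5
    have hsubmem : ∀ t ∈ q.2, t ∈ st := fun t ht => s1.sublist.mem ht
    have hknotst : k ∉ st := fun hm => by have := (h3 k hm).1; omega
    refine ih q.1 (k :: q.2) (by omega) (by rw [s2, h2]) ?_ ?_ ?_ ?_ ?_ ?_ ?_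
    · intro t ht
      rcases List.mem_cons.mp ht with h | h
      · omega
      · have := h3 t (hsubmem t h); omega
    · exact List.pairwise_cons.mpr
        ⟨fun t ht => by have := (h3 t (hsubmem t ht)).1; omega, h4.sublist s1.sublist⟩
    · exact List.pairwise_cons.mpr ⟨fun t ht => s3 t ht, h5.sublist s1.sublist⟩
    · intro t ht j hj1 hj2
      rcases List.mem_cons.mp ht with h | h
      · omega
      · by_cases hjk : j = k
        · subst hjk; exact s3 t h
        · exact h6 t (hsubmem t h) j (by omega) hj2
    · intro t ht
      rcases List.mem_cons.mp ht with h | h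
      · subst h
        rw [s5 t (Or.inl hknotst)]
        exact h8 t (by omega)
      · rw [s5 t (Or.inr h)]
        exact h7 t (hsubmem t h)
    · intro t ht
      have htnot : t ∉ st := fun hm => by have := (h3 t hm).1; omega
      rw [s5 t (Or.inl htnot)]
      exact h8 t (by omega)
    · intro t ht1 ht2 ht3
      have htnot : t ∉ q.2 := fun hm => ht3 (List.mem_cons_of_mem _ hm)
      have htk : t ≠ k := fun he => ht3 (he ▸ List.mem_cons_self)
      have htge : k + 1 ≤ t := by omega
      by_cases hmem : t ∈ st
      · obtain ⟨c1, c2⟩ := s4 t hmem htnot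
        rw [c2, h7 t hmem]
        have : bLeft arr (arr.getD t 0) t = (k : Int) :=
          bLeft_found arr (arr.getD t 0) t k (by omega)
            (by rw [← hx]; exact fun hlt => absurd c1 (by omega))
            (fun j hj1 hj2 => h6 t hmem j (by omega) hj2)
        rw [this]
        ring
      · rw [s5 t (Or.inl hmem)]
        exact h9 t (by omega) ht2 hmem

-- ===== VERDICT (by name: the statement is the Claim_ definition above) =====
theorem stack_solution_spec : Claim_equal_stack_solution := by
  intro arr _
  unfold Spec_stack_solution stack_solution stack_solution_alt
  set n := arr.length with hn
  obtain ⟨p1, p2, p3, p4, p5⟩ := pass1 arr n 0 (List.replicate n ((n : Nat) : Int)) []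
    (by omega) (by simp [hn]) (by simp) List.Pairwise.nil List.Pairwise.nil (by simp)
    (by simp) (fun t _ ht => List.getD_replicate _ ht) (fun t ht _ => absurd ht (by omega))
  rw [← List.range_eq_range'] at p1 p2 p3 p4 p5
  set s1 := (List.range n).foldl (aStep1 arr n) (List.replicate n ((n : Nat) : Int), ([] : List Nat)) with hs1
  have hres1 : ∀ t, t < n → s1.1.getD t 0 = nge arr t := by
    intro t ht
    by_cases hmem : t ∈ s1.2
    · rw [p4 t hmem]
      symm
      unfold nge
      rw [bRight_none arr (arr.getD t 0) (n - (t + 1)) (t + 1)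
        (fun j hj1 hj2 => p3 t hmem j (by omega) (by omega))]
      congr 1
      omega
    · exact p5 t (by omega) hmem
  obtain ⟨q1, q2⟩ := pass2 arr n s1.1 [] (le_refl n) p1 (by simp) List.Pairwise.nil
    List.Pairwise.nil (by simp) (by simp) (fun t ht => hres1 t ht)
    (fun t ht1 ht2 _ => by omega)
  refine List.ext_getElem (by simpa using q1) ?_
  intro j hj1 hj2
  have hjn : j < n := by simpa using hj2
  have := q2 j hjn
  simp only [List.getElem_map, List.getElem_range]
  rw [← List.getD_eq_getElem ((((List.range n).reverse).foldl (aStep2 arr) (s1.1, ([] : List Nat))).1) 0 (by rw [q1]; exact hjn)]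
  rw [this]
  unfold nge
  rfl
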